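-- pv_equiv track=rewrite | github.com/BLANC348/A-Tune | analysis/plugin/configurator/bootloader/bootutils.py | get_keypos
-- ===== SOURCE A (Python) =====
-- def get_keypos(str, key):
--     keys = [" " + key + "=", " " + key + " ", " " + key + "\n"]
--     ret = []
--     for k in keys:
--         pos = str.rfind(k)
--         if pos != -1:
--             pos += 1
--         ret.append(pos)
--     return max(ret)
-- ===== SOURCE B (Python) =====
-- def get_keypos(str, key):
--     # Single left-to-right scan: rightmost occurrence of " "+key followed by
--     # '=', ' ' or '\n' (the three variants A probes with separate rfinds).
--     target = " " + key
--     m = len(target)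
--     best = -1
--     start = 0
--     while True:
--         i = str.find(target, start)
--         if i == -1:
--             return best
--         j = i + m
--         if j < len(str) and str[j] in ("=", " ", "\n"):
--             best = i + 1
--         start = i + 1
-- ===== Notes on version B (the rewrite author's own statement) =====
-- stated objective: alternative
-- what changed: A runs three separate library rfind scans (one per variant " "+key+c for c in '=', ' ', '\n') and takes the max; B does a single left-to-right find loop for the shared prefix " "+key and keeps the last match whose following character is one of the three terminators.
import Mathlib
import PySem

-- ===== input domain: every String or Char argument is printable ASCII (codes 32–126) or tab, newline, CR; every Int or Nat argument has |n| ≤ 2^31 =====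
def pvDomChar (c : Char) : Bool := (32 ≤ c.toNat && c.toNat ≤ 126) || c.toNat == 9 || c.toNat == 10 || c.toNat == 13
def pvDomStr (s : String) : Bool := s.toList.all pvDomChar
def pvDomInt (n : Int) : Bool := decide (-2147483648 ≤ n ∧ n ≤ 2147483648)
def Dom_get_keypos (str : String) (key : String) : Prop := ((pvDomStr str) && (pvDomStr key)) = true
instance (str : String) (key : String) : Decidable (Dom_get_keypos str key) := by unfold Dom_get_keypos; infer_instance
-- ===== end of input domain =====

-- B replaces A's three library rfind scans + max by one manual left-to-right scan for
-- the shared prefix " "+key with a terminator-character test (objective: alternative).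

-- ===== PORT A =====
-- A: keys = [" "+key+"=", " "+key+" ", " "+key+"\n"]; for each, pos = str.rfind(k),
-- +1 if found, appended to ret; return max(ret). Concatenation done on char lists
-- (PySem string functions are defined on List Char). The .getD 0 only totalises
-- max(ret): ret always has three elements.
def get_keypos (str : String) (key : String) : Int :=
  let keys : List (List Char) :=
    [' ' :: key.toList ++ ['='], ' ' :: key.toList ++ [' '], ' ' :: key.toList ++ ['\n']]
  let ret : List Int := keys.foldl (fun r k =>
    let pos := PySem.Chars.rfind str.toList k
    let pos := if pos ≠ -1 then pos + 1 else pos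
    r ++ [pos]) []
  (PySem.List.max? ret id).getD 0

-- ===== PORT B =====
-- Source B: `j < len(str) and str[j] in ("=", " ", "\n")`
def gkTermOk : Option Char → Bool
  | some c => c == '=' || c == ' ' || c == '\n'
  | none => false

-- Source B's `while True` loop; fuel `cs.length + 1` only totalises it (start grows by ≥ 1
-- each iteration and a start past the end ends the loop).
def gkGo (cs target : List Char) (m : Nat) : Nat → Nat → Int → Int
  | 0, _, best => best
  | fuel + 1, start, best =>
    let i := PySem.Chars.findFrom cs target (start : Int) none
    if i = -1 then best
    else
      let j := i.toNat + m
      let best' := if gkTermOk cs[j]? then i + 1 else best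
      gkGo cs target m fuel (i.toNat + 1) best'

def get_keypos_alt (str : String) (key : String) : Int :=
  let target := ' ' :: key.toList
  let m := target.length
  let cs := str.toList
  gkGo cs target m (cs.length + 1) 0 (-1)

-- ===== PRECONDITION & SPEC =====
def Spec_get_keypos (str : String) (key : String) (out : Int) : Prop := out = get_keypos_alt str key
instance (str : String) (key : String) (out : Int) : Decidable (Spec_get_keypos str key out) := by unfold Spec_get_keypos; infer_instance

-- ===== CLAIM (what is proved, stated in full; the proofs are below) =====
def Claim_equal_get_keypos : Prop := ∀ (str : String) (key : String), Dom_get_keypos str key → Spec_get_keypos str key (get_keypos str key)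

-- ===== LEMMAS AND PROOFS =====

-- "last hit + 1" fold both programs reduce to
def gkF (H : Nat → Bool) (b : Int) (l : List Nat) : Int :=
  l.foldl (fun b j => if H j then (j : Int) + 1 else b) b

lemma gkF_no_hit (H : Nat → Bool) (b : Int) (l : List Nat)
    (h : ∀ j ∈ l, H j = false) : gkF H b l = b := by
  induction l generalizing b with
  | nil => rfl
  | cons x xs ih =>
      simp only [gkF, List.foldl_cons] at *
      rw [h x (by simp)]
      simpa using ih b (fun j hj => h j (by simp [hj]))

lemma gkF_max (P Q : Nat → Bool) (s l : Nat) (b1 b2 : Int)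
    (h1 : b1 ≤ s) (h2 : b2 ≤ s) :
    max (gkF P b1 (List.range' s l)) (gkF Q b2 (List.range' s l))
      = gkF (fun j => P j || Q j) (max b1 b2) (List.range' s l) := by
  induction l generalizing s b1 b2 with
  | zero => simp [gkF]
  | succ n ih =>
      rw [List.range'_succ]
      simp only [gkF, List.foldl_cons] at *
      have step : max (if P s then (s : Int) + 1 else b1) (if Q s then (s : Int) + 1 else b2)
          = if P s || Q s then (s : Int) + 1 else max b1 b2 := by
        by_cases hP : P s <;> by_cases hQ : Q s <;> simp [hP, hQ] <;> omega
      rw [← step]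
      exact ih (s + 1) _ _ (by split <;> omega) (by split <;> omega)

-- A's per-key value (rfind, then +1 if found) as the fold
lemma gk_rfind_go (cs p : List Char) (n : Nat) :
    (if PySem.Chars.rfind.go cs p n ≠ -1 then PySem.Chars.rfind.go cs p n + 1
     else PySem.Chars.rfind.go cs p n)
      = gkF (fun j => p.isPrefixOf (cs.drop j)) (-1) (List.range (n + 1)) := by
  induction n with
  | zero =>
      simp only [PySem.Chars.rfind.go, gkF, List.range_succ, List.range_zero,
        List.nil_append, List.foldl_cons, List.foldl_nil]
      split <;> simp_all
  | succ n ih =>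
      rw [List.range_succ, gkF, List.foldl_append, List.foldl_cons, List.foldl_nil, ← gkF,
        ← ih]
      by_cases h : p.isPrefixOf (cs.drop (n + 1)) = true
      · simp only [PySem.Chars.rfind.go, h, if_pos]
        rw [if_pos (by push_cast; omega)]
      · simp only [PySem.Chars.rfind.go, h, if_false, Bool.false_eq_true]

lemma gk_prefix_drop_infix {l u : List Char} {d : Nat} (h : l <+: u.drop d) :
    l <:+: u := by
  obtain ⟨t, ht⟩ := h
  exact ⟨u.take d, t, by rw [List.append_assoc, ht, List.take_append_drop]⟩

lemma gk_append_singleton_prefix (p u : List Char) (c : Char) :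
    (p ++ [c]) <+: u ↔ p <+: u ∧ u[p.length]? = some c := by
  constructor
  · intro h
    obtain ⟨t, ht⟩ := h
    refine ⟨⟨c :: t, by simpa using ht⟩, ?_⟩
    rw [← ht]
    simp
  · rintro ⟨hp, hc⟩
    rw [List.prefix_iff_eq_take] at hp ⊢
    rw [List.length_append, List.length_cons, List.length_nil, List.take_add_one, ← hp, hc]
    rfl

-- the three patterns' disjunction is B's combined test
lemma gk_three_eq (cs target : List Char) (j : Nat) :
    (((target ++ ['=']).isPrefixOf (cs.drop j) || (target ++ [' ']).isPrefixOf (cs.drop j))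
      || (target ++ ['\n']).isPrefixOf (cs.drop j))
      = (target.isPrefixOf (cs.drop j) && gkTermOk cs[j + target.length]?) := by
  have hkey : ∀ c : Char, (target ++ [c]).isPrefixOf (cs.drop j)
      = (target.isPrefixOf (cs.drop j) && cs[j + target.length]? == some c) := by
    intro c
    rw [Bool.eq_iff_iff]
    simp only [List.isPrefixOf_iff_prefix, Bool.and_eq_true, beq_iff_eq]
    rw [gk_append_singleton_prefix, List.getElem?_drop]
  rw [hkey, hkey, hkey]
  cases h : cs[j + target.length]? with
  | none => simp [gkTermOk]
  | some c => cases target.isPrefixOf (cs.drop j) <;> simp [gkTermOk]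

-- B's loop computes the fold of the combined test over the remaining positions
lemma gkGo_eq (cs target : List Char) (hne : target ≠ []) :
    ∀ (fuel start : Nat) (best : Int), cs.length + 1 - start ≤ fuel →
    gkGo cs target target.length fuel start best
      = gkF (fun j => target.isPrefixOf (cs.drop j) && gkTermOk cs[j + target.length]?)
          best (List.range' start (cs.length + 1 - start)) := by
  intro fuel
  induction fuel with
  | zero =>
      intro start best h
      have h0 : cs.length + 1 - start = 0 := by omega
      simp [gkGo, h0, gkF]
  | succ fuel ih =>
      intro start best _
      by_cases hs : start ≤ cs.length
      · simp only [gkGo]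
        by_cases hi : PySem.Chars.findFrom cs target (start : Int) none = -1
        · rw [if_pos hi, gkF_no_hit]
          intro j hj
          have hj' : start ≤ j := (List.mem_range'_1.mp hj).1
          rw [(PySem.Chars.findFrom_natCast_eq_neg_one_iff cs target start hs)] at hi
          simp only [Bool.and_eq_false_iff]
          left
          rw [← Bool.not_eq_true, List.isPrefixOf_iff_prefix]
          intro hpre
          exact hi (gk_prefix_drop_infix (d := j - start)
            (by rwa [List.drop_drop, Nat.add_sub_cancel' hj']))
        · rw [if_neg hi]
          obtain ⟨hle, hpre, hnone⟩ := PySem.Chars.findFrom_natCast_spec cs target start hs hi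
          set i := PySem.Chars.findFrom cs target (start : Int) none with hidef
          have hi0 : 0 ≤ i := le_trans (by exact_mod_cast Nat.zero_le start) hle
          have hiN : (i.toNat : Int) = i := Int.toNat_of_nonneg hi0
          have hilt : i.toNat < cs.length := by
            rcases hpre with ⟨t, ht⟩
            have hlen : target.length + t.length = (cs.drop i.toNat).length := by
              rw [← ht]; simp
            rw [List.length_drop] at hlen
            have : 0 < target.length := List.length_pos_iff.mpr hne
            omega
          have hsi : start ≤ i.toNat := by omega
          rw [ih (i.toNat + 1) _ (by omega)]
          have hsplit : List.range' start (cs.length + 1 - start)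
              = List.range' start (i.toNat - start) ++ i.toNat ::
                  List.range' (i.toNat + 1) (cs.length + 1 - (i.toNat + 1)) := by
            have e2 : cs.length + 1 - start = (i.toNat - start) + (cs.length + 1 - i.toNat) := by
              omega
            have e1 : start + 1 * (i.toNat - start) = i.toNat := by omega
            have e3 : cs.length + 1 - i.toNat = (cs.length + 1 - (i.toNat + 1)) + 1 := by omega
            rw [e2, ← List.range'_append, e1, e3, List.range'_succ]
          rw [hsplit]
          simp only [gkF, List.foldl_append, List.foldl_cons]
          congr 1
          have hfirst : List.foldl (fun b j =>
              if target.isPrefixOf (cs.drop j) && gkTermOk cs[j + target.length]? then (j:Int)+1 else b)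
              best (List.range' start (i.toNat - start)) = best := by
            apply gkF_no_hit
            intro j hj
            obtain ⟨h1, h2⟩ := List.mem_range'_1.mp hj
            simp only [Bool.and_eq_false_iff]
            left
            rw [← Bool.not_eq_true, List.isPrefixOf_iff_prefix]
            exact hnone j h1 (by omega)
          rw [hfirst]
          have htrue : target.isPrefixOf (List.drop i.toNat cs) = true := by
            rw [List.isPrefixOf_iff_prefix]; exact hpre
          simp only [htrue, Bool.true_and]
          split
          · rw [hiN]
          · rfl
      · have h0 : cs.length + 1 - start = 0 := by omega
        have hneg : ¬((start : Int) < 0) := by omega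
        have hlt : ((cs.length : Nat) : Int) < ((start : Nat) : Int) :=
          by exact_mod_cast (by omega : cs.length < start)
        simp only [gkGo, PySem.Chars.findFrom, if_neg hneg, if_pos hlt, h0, gkF,
          List.range'_zero, List.foldl_nil]
        simp

lemma gk_max3 (a b c : Int) :
    (PySem.List.max? [a, b, c] id).getD 0 = max (max a b) c := by
  simp only [PySem.List.max?, List.foldl, id]
  by_cases h1 : a < b <;> by_cases h2 : b < c <;> by_cases h3 : a < c <;>
    simp [h1, h2, h3] <;> omega

-- ===== VERDICT (by name: the statement is the Claim_ definition above) =====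
theorem get_keypos_spec : Claim_equal_get_keypos := by
  intro str key _
  unfold Spec_get_keypos get_keypos get_keypos_alt
  set cs := str.toList
  set target := ' ' :: key.toList with htarget
  have hne : target ≠ [] := by simp [htarget]
  simp only [List.foldl_cons, List.foldl_nil, List.nil_append, List.cons_append,
    PySem.Chars.rfind]
  rw [gkGo_eq cs target hne (cs.length + 1) 0 (-1) (by omega)]
  rw [gk_max3, gk_rfind_go, gk_rfind_go, gk_rfind_go, List.range_eq_range']
  rw [gkF_max _ _ 0 (cs.length + 1) _ _ (by norm_num) (by norm_num)]
  rw [gkF_max _ _ 0 (cs.length + 1) _ _ (by norm_num) (by norm_num)]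
  simp only [gk_three_eq, Nat.sub_zero]
  norm_num
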